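-- pv_equiv track=rewrite | github.com/hhwhhw204/WGMap | extract_fea/non-coding/extract_fea_hy.py | compute_k_mer_const
-- ===== SOURCE A (Python) =====
-- def compute_k_mer_const(k_mer_len):
--     nts = ['A', 'C', 'G', 'T']
--     kmers = []
--     kmers.append('')
--     l = 0
--     while l < k_mer_len:
--         imers = []
--         for imer in kmers:
--             for nt in nts:
--                 imers.append(imer + nt)
--         kmers = imers
--         l += 1
--     max_features = len(kmers)
--     rc = {'A': 'T', 'G': 'C', 'C': 'G', 'T': 'A'}
--     revcomp = lambda s: ''.join([rc[s[i]] for i in range(len(s) - 1, -1, -1)])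
--     kmer_id_dict = {}
--     for i in range(len(kmers)):
--         kmer_id_dict[kmers[i]] = i
--     nb_word = 0
--     mapping_dict = {}
--     for k_mer_id in kmers:
--         rc_id = revcomp(k_mer_id)
--         if rc_id in mapping_dict:
--             mapping_dict[k_mer_id] = rc_id
--         else:
--             mapping_dict[k_mer_id] = k_mer_id
--             nb_word += 1
--     return nb_word, kmers, mapping_dict
-- ===== SOURCE B (Python) =====
-- def compute_k_mer_const(k_mer_len):
--     def gen(n):
--         if n <= 0:
--             return ['']
--         return [s + nt for s in gen(n - 1) for nt in 'ACGT']
--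
--     kmers = gen(k_mer_len)
--     comp = str.maketrans('ACGT', 'TGCA')
--     nb_word = 0
--     mapping_dict = {}
--     for kmer in kmers:
--         rc = kmer.translate(comp)[::-1]
--         if rc < kmer:
--             mapping_dict[kmer] = rc
--         else:
--             mapping_dict[kmer] = kmer
--             nb_word += 1
--     return nb_word, kmers, mapping_dict
-- ===== Notes on version B (the rewrite author's own statement) =====
-- stated objective: simpler
-- what changed: B builds the k-mer list by a recursive flatMap comprehension instead of A's while-loop of nested append loops, and replaces A's stateful 'is the reverse-complement already a key of the partially built dict' membership test by a direct lexicographic comparison revcomp < kmer (valid because the generated list is sorted in ASCII order), dropping A's unused kmer_id_dict.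
import Mathlib
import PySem

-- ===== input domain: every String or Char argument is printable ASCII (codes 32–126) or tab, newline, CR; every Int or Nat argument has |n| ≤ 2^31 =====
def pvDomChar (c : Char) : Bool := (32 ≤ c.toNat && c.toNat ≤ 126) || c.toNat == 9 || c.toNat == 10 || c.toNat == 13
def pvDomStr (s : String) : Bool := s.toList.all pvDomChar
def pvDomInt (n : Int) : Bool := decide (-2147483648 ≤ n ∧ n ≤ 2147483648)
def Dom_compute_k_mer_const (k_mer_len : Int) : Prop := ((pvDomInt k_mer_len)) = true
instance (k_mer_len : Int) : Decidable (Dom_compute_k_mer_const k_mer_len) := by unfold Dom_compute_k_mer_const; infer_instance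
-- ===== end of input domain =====

-- B replaces A's stateful "is the reverse-complement already a key of the partially built
-- dict" test by a direct lexicographic comparison (revcomp < kmer), and builds the k-mer
-- list by recursion with flatMap instead of A's while-loop of nested append loops
-- (objective: simpler; same asymptotic cost).

-- Python 'a + b' on str, exact on code points (Lean's own String.append is kernel-opaque)
def pvCat (a b : String) : String := String.ofList (a.toList ++ b.toList)

-- ===== PORT A =====
def pvNts : List String := ["A", "C", "G", "T"]

-- the body of A's while loop: imers = []; for imer in kmers: for nt in nts: imers.append(imer + nt)
def pvStepA (kmers : List String) : List String :=
  kmers.foldl (fun imers imer => pvNts.foldl (fun imers nt => imers ++ [pvCat imer nt]) imers) []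

-- A's 'while l < k_mer_len' loop, one fuel unit per iteration (k_mer_len.toNat iterations)
def pvLoopA : Nat → List String → List String
  | 0, kmers => kmers
  | n + 1, kmers => pvLoopA n (pvStepA kmers)

def pvRcDict : PySem.Dict Char Char := PySem.Dict.ofList [('A', 'T'), ('G', 'C'), ('C', 'G'), ('T', 'A')]

-- revcomp = lambda s: ''.join([rc[s[i]] for i in range(len(s)-1, -1, -1)]); the KeyError /
-- IndexError defaults '?' are unreachable: revcomp is only applied to the A/C/G/T k-mers
def pvRevcompA (s : String) : String :=
  String.ofList ((PySem.List.pyRange ((s.toList.length : Int) - 1) (-1) (-1)).map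
    (fun i => (pvRcDict.get? (PySem.List.pyGetD s.toList i '?')).getD '?'))

def compute_k_mer_const (k_mer_len : Int) : Int × List String × (List (String × String)) :=
  let kmers := pvLoopA k_mer_len.toNat [""]
  let _max_features := kmers.length
  -- kmer_id_dict (dead in A, kept for faithfulness)
  let _kmer_id_dict := (PySem.List.pyRange 0 (kmers.length : Int) 1).foldl
    (fun d i => d.insert (PySem.List.pyGetD kmers i "") i) (PySem.Dict.empty : PySem.Dict String Int)
  let st := kmers.foldl
    (fun (st : Int × PySem.Dict String String) k_mer_id =>
      let rc_id := pvRevcompA k_mer_id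
      if st.2.contains rc_id then (st.1, st.2.insert k_mer_id rc_id)
      else (st.1 + 1, st.2.insert k_mer_id k_mer_id))
    (0, PySem.Dict.empty)
  (st.1, kmers, st.2.items)

-- ===== PORT B =====
-- str.maketrans('ACGT','TGCA'); str.translate leaves unmapped characters unchanged
def pvComp (c : Char) : Char :=
  if c = 'A' then 'T' else if c = 'C' then 'G' else if c = 'G' then 'C' else if c = 'T' then 'A' else c

-- the characters of the string 'ACGT' that Source B's comprehension iterates over
def pvACGT : List Char := ['A', 'C', 'G', 'T']

-- Source B's gen(n): [s + nt for s in gen(n-1) for nt in 'ACGT'], base [''] for n <= 0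
def pvGenB : Nat → List String
  | 0 => [""]
  | n + 1 => (pvGenB n).flatMap (fun s => pvACGT.map (fun nt => pvCat s (String.ofList [nt])))

-- kmer.translate(comp)[::-1]  (s[::-1] is reversal, cf. PySem.Str.slice?_none_none_neg_one)
def pvRevcompB (s : String) : String := String.ofList ((s.toList.map pvComp).reverse)

def compute_k_mer_const_alt (k_mer_len : Int) : Int × List String × (List (String × String)) :=
  let kmers := pvGenB k_mer_len.toNat
  let st := kmers.foldl
    (fun (st : Int × PySem.Dict String String) kmer =>
      let rc := pvRevcompB kmer
      if rc < kmer then (st.1, st.2.insert kmer rc)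
      else (st.1 + 1, st.2.insert kmer kmer))
    (0, PySem.Dict.empty)
  (st.1, kmers, st.2.items)

-- ===== PRECONDITION & SPEC =====
def Spec_compute_k_mer_const (k_mer_len : Int) (out : Int × List String × (List (String × String))) : Prop := out = compute_k_mer_const_alt k_mer_len
instance (k_mer_len : Int) (out : Int × List String × (List (String × String))) : Decidable (Spec_compute_k_mer_const k_mer_len out) := by unfold Spec_compute_k_mer_const; infer_instance

-- ===== CLAIM (what is proved, stated in full; the proofs are below) =====
def Claim_equal_compute_k_mer_const : Prop := ∀ (k_mer_len : Int), Dom_compute_k_mer_const k_mer_len → Spec_compute_k_mer_const k_mer_len (compute_k_mer_const k_mer_len)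

-- ===== LEMMAS AND PROOFS =====

-- all words of length n over ACGT, in order (list-of-chars mirror of the k-mer lists)
def pvWords : Nat → List (List Char)
  | 0 => [[]]
  | n + 1 => (pvWords n).flatMap (fun w => pvACGT.map (fun c => w ++ [c]))

theorem pvGenB_eq_words : ∀ n, pvGenB n = (pvWords n).map String.ofList := by
  intro n
  induction n with
  | zero =>
    show [""] = [String.ofList []]
    decide
  | succ n ih =>
    simp only [pvGenB, pvWords, ih, List.flatMap_map, List.map_flatMap, List.map_map]
    apply List.flatMap_congr
    intro w _
    simp [pvCat, Function.comp_def]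

theorem pvLoopA_step : ∀ (n : Nat) (s : List String), pvLoopA (n + 1) s = pvStepA (pvLoopA n s) := by
  intro n
  induction n with
  | zero => intro s; rfl
  | succ n ih =>
    intro s
    rw [show pvLoopA (n + 1 + 1) s = pvLoopA (n + 1) (pvStepA s) from rfl, ih,
      show pvLoopA (n + 1) s = pvLoopA n (pvStepA s) from rfl]

theorem pvStepA_eq (l : List String) :
    pvStepA l = l.flatMap (fun s => pvACGT.map (fun nt => pvCat s (String.ofList [nt]))) := by
  unfold pvStepA
  have inner : ∀ (acc : List String) (imer : String),
      pvNts.foldl (fun a nt => a ++ [pvCat imer nt]) acc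
        = acc ++ pvACGT.map (fun nt => pvCat imer (String.ofList [nt])) := by
    intro acc imer
    have hA : ("A" : String) = String.ofList ['A'] := by decide
    have hC : ("C" : String) = String.ofList ['C'] := by decide
    have hG : ("G" : String) = String.ofList ['G'] := by decide
    have hT : ("T" : String) = String.ofList ['T'] := by decide
    simp only [pvNts, pvACGT, List.foldl_cons, List.foldl_nil, List.map_cons, List.map_nil,
      hA, hC, hG, hT, List.append_assoc]
    rfl
  simp only [inner]
  rw [PySem.List.foldl_append_eq_flatMap]
  simp

theorem pvKmersA_eq (n : Nat) : pvLoopA n [""] = pvGenB n := by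
  induction n with
  | zero => rfl
  | succ n ih => rw [pvLoopA_step, ih, pvStepA_eq]; rfl

theorem pvMem_words : ∀ (n : Nat) (w : List Char),
    w ∈ pvWords n ↔ w.length = n ∧ ∀ c ∈ w, c ∈ pvACGT := by
  intro n
  induction n with
  | zero =>
    intro w
    simp only [pvWords, List.mem_singleton]
    constructor
    · rintro rfl; exact ⟨rfl, by simp⟩
    · rintro ⟨h, _⟩; exact List.length_eq_zero_iff.mp h
  | succ n ih =>
    intro w
    simp only [pvWords, List.mem_flatMap, List.mem_map]
    constructor
    · rintro ⟨w', hw', c, hc, rfl⟩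
      obtain ⟨hlen, hall⟩ := (ih w').mp hw'
      refine ⟨by simp [hlen], ?_⟩
      intro d hd
      rcases List.mem_append.mp hd with h | h
      · exact hall d h
      · rw [List.mem_singleton] at h; subst h; exact hc
    · rintro ⟨hlen, hall⟩
      have hne : w ≠ [] := by intro h; subst h; simp at hlen
      refine ⟨w.dropLast, (ih _).mpr ⟨?_, fun c hc => hall c (List.dropLast_subset w hc)⟩,
        w.getLast hne, hall _ (List.getLast_mem hne), List.dropLast_append_getLast hne⟩
      simp [List.length_dropLast, hlen]

-- appending one character to equal-length words preserves strict lexicographic order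
theorem pvLexAppend : ∀ (l1 l2 : List Char) (a b : Char), l1.length = l2.length →
    (List.Lex (· < ·) l1 l2 ∨ (l1 = l2 ∧ a < b)) → List.Lex (· < ·) (l1 ++ [a]) (l2 ++ [b]) := by
  intro l1
  induction l1 with
  | nil =>
    intro l2 a b hlen h
    have h2 : l2 = [] := (List.length_eq_zero_iff.mp hlen.symm)
    subst h2
    rcases h with h | ⟨_, hab⟩
    · cases h
    · exact List.Lex.rel hab
  | cons x t1 ih =>
    intro l2 a b hlen h
    cases l2 with
    | nil => simp at hlen
    | cons y t2 =>
      rcases h with h | ⟨heq, hab⟩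
      · cases h with
        | rel h => exact List.Lex.rel h
        | cons h => exact List.Lex.cons (ih t2 a b (by simpa using hlen) (Or.inl h))
      · cases heq
        exact List.Lex.cons (ih t1 a b rfl (Or.inr ⟨rfl, hab⟩))

theorem pvWords_pairwise : ∀ n, (pvWords n).Pairwise (fun a b => List.Lex (· < ·) a b) := by
  intro n
  induction n with
  | zero => simp [pvWords]
  | succ n ih =>
    show ((pvWords n).flatMap _).Pairwise _
    rw [List.flatMap_def, List.pairwise_flatten]
    constructor
    · intro l' hl'
      obtain ⟨w, _, rfl⟩ := List.mem_map.mp hl'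
      rw [List.pairwise_map]
      have hp : pvACGT.Pairwise (· < ·) := by decide
      exact hp.imp (fun hab => pvLexAppend w w _ _ rfl (Or.inr ⟨rfl, hab⟩))
    · rw [List.pairwise_map]
      apply List.Pairwise.imp_of_mem ?_ ih
      intro w1 w2 h1 h2 hlex x hx y hy
      obtain ⟨a, _, rfl⟩ := List.mem_map.mp hx
      obtain ⟨b, _, rfl⟩ := List.mem_map.mp hy
      have hl1 := ((pvMem_words n w1).mp h1).1
      have hl2 := ((pvMem_words n w2).mp h2).1
      exact pvLexAppend w1 w2 a b (hl1.trans hl2.symm) (Or.inl hlex)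

theorem pvStrLt_of_lex {w1 w2 : List Char} (h : List.Lex (· < ·) w1 w2) :
    String.ofList w1 < String.ofList w2 := by
  rw [String.lt_iff_toList_lt]
  simpa [List.lt_iff_lex_lt] using h

theorem pvGenB_pairwise (n : Nat) : (pvGenB n).Pairwise (· < ·) := by
  rw [pvGenB_eq_words, List.pairwise_map]
  exact (pvWords_pairwise n).imp pvStrLt_of_lex

theorem pvRevcomp_agree (s : String) (h : ∀ c ∈ s.toList, c ∈ pvACGT) :
    pvRevcompA s = pvRevcompB s := by
  unfold pvRevcompA pvRevcompB
  congr 1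
  rw [PySem.List.pyRange_neg_one_eq_reverse]
  rw [show ((-1 : Int) + 1) = 0 from by norm_num,
    show ((s.toList.length : Int) - 1 + 1) = (s.toList.length : Int) from by ring]
  rw [List.map_reverse]
  congr 1
  have h2 : ((PySem.List.pyRange 0 (s.toList.length : Int) 1).map
        (fun j => PySem.List.pyGetD s.toList j '?')).map
        (fun c => (pvRcDict.get? c).getD '?')
      = (PySem.List.pyRange 0 (s.toList.length : Int) 1).map
        (fun i => (pvRcDict.get? (PySem.List.pyGetD s.toList i '?')).getD '?') := List.map_map
  rw [← h2, PySem.List.map_pyGetD_pyRange_zero']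
  apply List.map_congr_left
  intro c hc
  have hm := h c hc
  fin_cases hm <;> decide

theorem pvRevcompB_words {n : Nat} {w : List Char} (hw : w ∈ pvWords n) :
    (w.map pvComp).reverse ∈ pvWords n := by
  obtain ⟨hlen, hall⟩ := (pvMem_words n w).mp hw
  refine (pvMem_words n _).mpr ⟨by simp [hlen], ?_⟩
  intro c hc
  rw [List.mem_reverse] at hc
  obtain ⟨d, hd, rfl⟩ := List.mem_map.mp hc
  have := hall d hd
  fin_cases this <;> decide

theorem pvRevcompB_mem (n : Nat) (s : String) (h : s ∈ pvGenB n) : pvRevcompB s ∈ pvGenB n := by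
  rw [pvGenB_eq_words] at h ⊢
  obtain ⟨w, hw, rfl⟩ := List.mem_map.mp h
  refine List.mem_map.mpr ⟨(w.map pvComp).reverse, pvRevcompB_words hw, ?_⟩
  simp [pvRevcompB]

theorem pvMem_genB (n : Nat) (s : String) (h : s ∈ pvGenB n) : ∀ c ∈ s.toList, c ∈ pvACGT := by
  rw [pvGenB_eq_words] at h
  obtain ⟨w, hw, rfl⟩ := List.mem_map.mp h
  simpa using ((pvMem_words n w).mp hw).2

-- the two mapping-dict loops agree step by step: membership of the reverse complement in the
-- processed prefix coincides with the lexicographic test, on a sorted closed k-mer list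
theorem pvLoop_eq (L : List String) (hPW : L.Pairwise (· < ·))
    (hRC : ∀ s ∈ L, pvRevcompA s = pvRevcompB s ∧ pvRevcompB s ∈ L) :
    ∀ (rest pre : List String) (nb : Int) (d : PySem.Dict String String),
    L = pre ++ rest → (∀ x, d.contains x = decide (x ∈ pre)) →
    rest.foldl
      (fun (st : Int × PySem.Dict String String) k_mer_id =>
        let rc_id := pvRevcompA k_mer_id
        if st.2.contains rc_id then (st.1, st.2.insert k_mer_id rc_id)
        else (st.1 + 1, st.2.insert k_mer_id k_mer_id)) (nb, d) =
    rest.foldl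
      (fun (st : Int × PySem.Dict String String) kmer =>
        let rc := pvRevcompB kmer
        if rc < kmer then (st.1, st.2.insert kmer rc)
        else (st.1 + 1, st.2.insert kmer kmer)) (nb, d) := by
  intro rest
  induction rest with
  | nil => intros; rfl
  | cons k rest' ih =>
    intro pre nb d hsplit hd
    have hkL : k ∈ L := by rw [hsplit]; simp
    obtain ⟨hAB, hmem⟩ := hRC k hkL
    have hiff : pvRevcompB k ∈ pre ↔ pvRevcompB k < k := by
      constructor
      · intro hp
        exact (List.pairwise_append.mp (hsplit ▸ hPW)).2.2 _ hp k (by simp)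
      · intro hlt
        have hmem' : pvRevcompB k ∈ pre ++ k :: rest' := hsplit ▸ hmem
        rcases List.mem_append.mp hmem' with h | h
        · exact h
        · rcases List.mem_cons.mp h with h | h
          · rw [h] at hlt; exact absurd hlt (lt_irrefl k)
          · have hpair := (List.pairwise_append.mp (hsplit ▸ hPW)).2.1
            have hk_lt : k < pvRevcompB k := (List.pairwise_cons.mp hpair).1 _ h
            exact absurd hlt (lt_asymm hk_lt)
    have hcond : d.contains (pvRevcompB k) = decide (pvRevcompB k < k) := by
      rw [hd]; exact decide_eq_decide.mpr hiff
    have hsplit' : L = (pre ++ [k]) ++ rest' := by rw [hsplit, List.append_assoc]; rfl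
    have hd' : ∀ (v : String) (x : String),
        ((d.insert k v).contains x) = decide (x ∈ pre ++ [k]) := by
      intro v x
      rw [PySem.Dict.contains_insert, hd x]
      by_cases hx : x = k <;> simp [hx]
    simp only [List.foldl_cons, hAB, hcond]
    by_cases hlt : pvRevcompB k < k
    · simp only [if_pos hlt, if_pos (decide_eq_true (p := pvRevcompB k < k) hlt)]
      exact ih (pre ++ [k]) nb (d.insert k (pvRevcompB k)) hsplit' (hd' _)
    · simp only [if_neg hlt, if_neg (by simpa using hlt : ¬ (decide (pvRevcompB k < k) = true))]
      exact ih (pre ++ [k]) (nb + 1) (d.insert k k) hsplit' (hd' _)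

-- ===== VERDICT (by name: the statement is the Claim_ definition above) =====
theorem compute_k_mer_const_spec : Claim_equal_compute_k_mer_const := by
  intro k _
  unfold Spec_compute_k_mer_const compute_k_mer_const compute_k_mer_const_alt
  rw [pvKmersA_eq]
  have hpw := pvGenB_pairwise k.toNat
  have hrc : ∀ s ∈ pvGenB k.toNat, pvRevcompA s = pvRevcompB s ∧ pvRevcompB s ∈ pvGenB k.toNat :=
    fun s hs => ⟨pvRevcomp_agree s (pvMem_genB _ s hs), pvRevcompB_mem _ s hs⟩
  have h := pvLoop_eq (pvGenB k.toNat) hpw hrc (pvGenB k.toNat) [] 0 PySem.Dict.empty rfl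
    (by intro x; simp [PySem.Dict.contains_empty])
  simp only [h]
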